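-- pv_equiv track=rewrite | github.com/heqichang/dogfooding | secret-scan/secret_scan/detectors/entropy.py | _get_column_from_pos
-- ===== SOURCE A (Python) =====
-- from typing import List, Optional, Set, Tuple
--
-- def _get_column_from_pos(lines: List[str], pos: int) -> int:
--     """Calculate column number from a character position."""
--     current_pos = 0
--     for line in lines:
--         line_len = len(line) + 1
--         if current_pos <= pos < current_pos + line_len:
--             return pos - current_pos + 1
--         current_pos += line_len
--     return 1
-- ===== SOURCE B (Python) =====
-- from typing import List
--
--
-- def _get_column_from_pos(lines: List[str], pos: int) -> int:
--     """Calculate column number from a character position.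
--
--     Builds a cumulative-offset table (line start offsets, newline included),
--     then binary-searches for the owning line instead of scanning linearly.
--     """
--     cum = [0]
--     total = 0
--     for line in lines:
--         total += len(line) + 1
--         cum.append(total)
--     # hand-written bisect_right(cum, pos)
--     lo, hi = 0, len(cum)
--     while lo < hi:
--         mid = (lo + hi) // 2
--         if cum[mid] <= pos:
--             lo = mid + 1
--         else:
--             hi = mid
--     i = lo - 1
--     if 0 <= i < len(lines):
--         return pos - cum[i] + 1
--     return 1
-- ===== Notes on version B (the rewrite author's own statement) =====
-- stated objective: alternative
-- what changed: Replaces the linear scan with running offset by building a cumulative line-start offset table once and binary-searching (hand-written bisect_right) for the owning line.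
import Mathlib
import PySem

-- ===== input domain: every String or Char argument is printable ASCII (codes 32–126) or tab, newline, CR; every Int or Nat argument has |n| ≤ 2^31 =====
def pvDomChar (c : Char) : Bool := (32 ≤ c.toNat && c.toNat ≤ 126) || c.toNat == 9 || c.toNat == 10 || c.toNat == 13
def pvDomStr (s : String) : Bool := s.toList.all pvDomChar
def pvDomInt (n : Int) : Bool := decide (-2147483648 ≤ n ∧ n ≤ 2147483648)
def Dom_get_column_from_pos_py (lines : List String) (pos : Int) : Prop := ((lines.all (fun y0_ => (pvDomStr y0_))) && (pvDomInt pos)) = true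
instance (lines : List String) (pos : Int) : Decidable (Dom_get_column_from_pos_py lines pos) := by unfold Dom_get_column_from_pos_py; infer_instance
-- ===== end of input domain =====

-- B builds a cumulative line-start offset table once and binary-searches it for the
-- owning line instead of A's linear scan with a running offset (alternative algorithm).


-- ===== PORT A =====
-- A's loop over lines with the running offset current_pos
def getColAuxA : List String → Int → Int → Int
  | [], _, _ => 1
  | line :: rest, current_pos, pos =>
    let line_len := PySem.Str.len line + 1
    if current_pos ≤ pos ∧ pos < current_pos + line_len then pos - current_pos + 1
    else getColAuxA rest (current_pos + line_len) pos

def get_column_from_pos_py (lines : List String) (pos : Int) : Int :=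
  getColAuxA lines 0 pos

-- ===== PORT B =====
-- hand-written bisect_right loop from Source B (while lo < hi …)
def bisectRightB (cum : List Int) (pos : Int) (lo hi : Nat) : Nat :=
  if h : lo < hi then
    let mid := (lo + hi) / 2
    if cum.getD mid 0 ≤ pos then bisectRightB cum pos (mid + 1) hi
    else bisectRightB cum pos lo mid
  else lo
termination_by hi - lo
decreasing_by all_goals omega

-- the cum/total building loop of Source B
def bCumState (lines : List String) : List Int × Int :=
  lines.foldl (fun st line =>
    (st.1 ++ [st.2 + PySem.Str.len line + 1], st.2 + PySem.Str.len line + 1)) ([0], 0)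

def get_column_from_pos_py_alt (lines : List String) (pos : Int) : Int :=
  let cum := (bCumState lines).1
  let lo := bisectRightB cum pos 0 cum.length
  let i : Int := (lo : Int) - 1
  if 0 ≤ i ∧ i < (lines.length : Int) then pos - cum.getD i.toNat 0 + 1 else 1

-- ===== PRECONDITION & SPEC =====
def Spec_get_column_from_pos_py (lines : List String) (pos : Int) (out : Int) : Prop := out = get_column_from_pos_py_alt lines pos
instance (lines : List String) (pos : Int) (out : Int) : Decidable (Spec_get_column_from_pos_py lines pos out) := by unfold Spec_get_column_from_pos_py; infer_instance

-- ===== CLAIM (what is proved, stated in full; the proofs are below) =====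
def Claim_equal_get_column_from_pos_py : Prop := ∀ (lines : List String) (pos : Int), Dom_get_column_from_pos_py lines pos → Spec_get_column_from_pos_py lines pos (get_column_from_pos_py lines pos)

-- ===== LEMMAS AND PROOFS =====

-- prefix sum of (len + 1) over the first i lines
def prefLen : List String → Nat → Int
  | _, 0 => 0
  | [], _ + 1 => 0
  | l :: ls, i + 1 => PySem.Str.len l + 1 + prefLen ls i

-- the tail of the cum table built from offset t
def cumFrom : List String → Int → List Int
  | [], _ => []
  | l :: ls, t => (t + PySem.Str.len l + 1) :: cumFrom ls (t + PySem.Str.len l + 1)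

theorem strLen_nonneg (s : String) : 0 ≤ PySem.Str.len s := by
  simp [PySem.Str.len_eq]

theorem prefLen_nonneg (ls : List String) (i : Nat) : 0 ≤ prefLen ls i := by
  induction ls generalizing i with
  | nil => cases i <;> simp [prefLen]
  | cons l ls ih =>
    cases i with
    | zero => simp [prefLen]
    | succ i =>
      have := strLen_nonneg l
      have := ih i
      simp only [prefLen]; omega

theorem cumFrom_length (ls : List String) (t : Int) : (cumFrom ls t).length = ls.length := by
  induction ls generalizing t with
  | nil => simp [cumFrom]
  | cons l ls ih => simp [cumFrom, ih]

theorem cumFrom_getD (ls : List String) (t : Int) (i : Nat) (hi : i ≤ ls.length) :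
    (t :: cumFrom ls t).getD i 0 = t + prefLen ls i := by
  induction ls generalizing t i with
  | nil =>
    have hz : i = 0 := by simpa using hi
    subst hz
    simp [prefLen]
  | cons l ls ih =>
    cases i with
    | zero => simp [prefLen]
    | succ i =>
      simp only [cumFrom, List.getD_cons_succ, prefLen]
      have := ih (t + PySem.Str.len l + 1) i (by simpa using hi)
      rw [this]; ring

theorem prefLen_mono (ls : List String) (i j : Nat) (hij : i ≤ j) (hj : j ≤ ls.length) :
    prefLen ls i ≤ prefLen ls j := by
  induction ls generalizing i j with
  | nil =>
    have hz : j = 0 := by simpa using hj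
    have hz2 : i = 0 := by omega
    subst hz; subst hz2; simp
  | cons l ls ih =>
    cases j with
    | zero =>
      have hz : i = 0 := by omega
      subst hz; simp
    | succ j =>
      cases i with
      | zero =>
        simp only [prefLen]
        have := strLen_nonneg l
        have := prefLen_nonneg ls j
        omega
      | succ i =>
        simp only [prefLen]
        have := ih i j (by omega) (by simpa using hj)
        omega

-- the bCumState foldl builds exactly 0 :: cumFrom lines 0
theorem bCumState_eq_aux (lines : List String) (acc : List Int) (t : Int) :
    lines.foldl (fun st line =>
      (st.1 ++ [st.2 + PySem.Str.len line + 1], st.2 + PySem.Str.len line + 1)) (acc, t)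
    = (acc ++ cumFrom lines t, t + prefLen lines lines.length) := by
  induction lines generalizing acc t with
  | nil => simp [cumFrom, prefLen]
  | cons l ls ih =>
    simp only [List.foldl_cons, cumFrom]
    rw [ih]
    simp only [List.append_assoc, List.singleton_append, List.length_cons, prefLen,
      Prod.mk.injEq]
    refine ⟨by simp, by ring⟩

theorem bCumState_fst (lines : List String) :
    (bCumState lines).1 = 0 :: cumFrom lines 0 := by
  unfold bCumState
  rw [bCumState_eq_aux]
  simp

-- binary-search invariant for bisectRightB on a monotone table
theorem bisectRightB_spec (cum : List Int) (pos : Int)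
    (mono : ∀ j1 j2 : Nat, j1 ≤ j2 → j2 < cum.length → cum.getD j1 0 ≤ cum.getD j2 0) :
    ∀ lo hi : Nat, hi ≤ cum.length → lo ≤ hi →
    (∀ j, j < lo → cum.getD j 0 ≤ pos) →
    (∀ j, hi ≤ j → j < cum.length → pos < cum.getD j 0) →
    (∀ j, j < bisectRightB cum pos lo hi → cum.getD j 0 ≤ pos) ∧
    (∀ j, bisectRightB cum pos lo hi ≤ j → j < cum.length → pos < cum.getD j 0) := by
  intro lo hi
  induction lo, hi using bisectRightB.induct cum pos with
  | case1 lo hi h mid hle ih =>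
    intro hhi hlh hlow hhigh
    have hm : mid = (lo + hi) / 2 := rfl
    have hmid : lo ≤ mid ∧ mid < hi := by omega
    rw [bisectRightB]
    simp only [dif_pos h, ← hm, if_pos hle]
    apply ih (by omega) (by omega)
    · intro j hj
      rcases Nat.lt_or_ge j lo with hc | hc
      · exact hlow j hc
      · exact le_trans (mono j mid (by omega) (by omega)) hle
    · exact hhigh
  | case2 lo hi h mid hgt ih =>
    intro hhi hlh hlow hhigh
    have hm : mid = (lo + hi) / 2 := rfl
    have hmid : lo ≤ mid ∧ mid < hi := by omega
    rw [bisectRightB]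
    simp only [dif_pos h, ← hm, if_neg hgt]
    apply ih (by omega) (by omega)
    · exact hlow
    · intro j hj hjlen
      have := mono mid j hj hjlen
      omega
  | case3 lo hi h =>
    intro hhi hlh hlow hhigh
    rw [bisectRightB]
    simp only [dif_neg h]
    exact ⟨hlow, fun j hj hjl => hhigh j (by omega) hjl⟩

theorem bisectRightB_le (cum : List Int) (pos : Int) :
    ∀ lo hi : Nat, lo ≤ hi → lo ≤ bisectRightB cum pos lo hi ∧ bisectRightB cum pos lo hi ≤ hi := by
  intro lo hi
  induction lo, hi using bisectRightB.induct cum pos with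
  | case1 lo hi h mid hle ih =>
    intro _
    have hm : mid = (lo + hi) / 2 := rfl
    rw [bisectRightB]; simp only [dif_pos h, ← hm, if_pos hle]
    have := ih (by omega)
    omega
  | case2 lo hi h mid hgt ih =>
    intro _
    have hm : mid = (lo + hi) / 2 := rfl
    rw [bisectRightB]; simp only [dif_pos h, ← hm, if_neg hgt]
    have := ih (by omega)
    omega
  | case3 lo hi h =>
    intro _
    rw [bisectRightB]; simp only [dif_neg h]
    omega

-- A-side: below every line start
theorem getColAuxA_low (lines : List String) (t pos : Int) (h : pos < t) :
    getColAuxA lines t pos = 1 := by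
  induction lines generalizing t with
  | nil => rfl
  | cons l ls ih =>
    simp only [getColAuxA]
    rw [if_neg (by omega)]
    exact ih _ (by have := strLen_nonneg l; omega)

-- A-side: at or past the end
theorem getColAuxA_high (lines : List String) (t pos : Int)
    (h : t + prefLen lines lines.length ≤ pos) :
    getColAuxA lines t pos = 1 := by
  induction lines generalizing t with
  | nil => rfl
  | cons l ls ih =>
    simp only [List.length_cons, prefLen] at h
    have hn := prefLen_nonneg ls ls.length
    simp only [getColAuxA]
    rw [if_neg (by omega)]
    exact ih _ (by omega)

-- A-side: inside line i
theorem getColAuxA_mid (lines : List String) (t pos : Int) (i : Nat)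
    (hi : i < lines.length)
    (h1 : t + prefLen lines i ≤ pos) (h2 : pos < t + prefLen lines (i + 1)) :
    getColAuxA lines t pos = pos - (t + prefLen lines i) + 1 := by
  induction lines generalizing t i with
  | nil => simp at hi
  | cons l ls ih =>
    cases i with
    | zero =>
      simp only [prefLen] at h1 h2 ⊢
      simp only [getColAuxA]
      rw [if_pos ⟨by omega, by omega⟩]
      omega
    | succ i =>
      simp only [prefLen] at h1 h2 ⊢
      have hn := prefLen_nonneg ls i
      simp only [getColAuxA]
      rw [if_neg (by omega)]
      have := ih (t + (PySem.Str.len l + 1)) i (by simpa using hi)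
        (by omega) (by omega)
      rw [this]; ring_nf

-- ===== VERDICT (by name: the statement is the Claim_ definition above) =====
theorem get_column_from_pos_py_spec : Claim_equal_get_column_from_pos_py := by
  intro lines pos _
  unfold Spec_get_column_from_pos_py get_column_from_pos_py get_column_from_pos_py_alt
  simp only [bCumState_fst]
  set cl := (0 : Int) :: cumFrom lines 0 with hcl
  have hlen : cl.length = lines.length + 1 := by simp [hcl, cumFrom_length]
  have hget : ∀ i : Nat, i ≤ lines.length → cl.getD i 0 = prefLen lines i := by
    intro i hi
    have := cumFrom_getD lines 0 i hi
    simpa using this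
  have mono : ∀ j1 j2 : Nat, j1 ≤ j2 → j2 < cl.length → cl.getD j1 0 ≤ cl.getD j2 0 := by
    intro j1 j2 h12 h2
    rw [hget j1 (by omega), hget j2 (by omega)]
    exact prefLen_mono lines j1 j2 h12 (by omega)
  set r := bisectRightB cl pos 0 cl.length with hr
  have hspec := bisectRightB_spec cl pos mono 0 cl.length le_rfl (Nat.zero_le _)
    (by omega) (by intro j hj hjl; omega)
  have hrle := bisectRightB_le cl pos 0 cl.length (Nat.zero_le _)
  rw [← hr] at hspec hrle
  obtain ⟨hlow, hhigh⟩ := hspec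
  by_cases hr0 : r = 0
  · -- pos < cl[0] = 0 : A returns 1 via getColAuxA_low
    have hneg : pos < 0 := by
      have := hhigh 0 (by omega) (by omega)
      simpa [hcl] using this
    rw [if_neg (by omega)]
    exact getColAuxA_low lines 0 pos hneg
  · by_cases hrn : r = lines.length + 1
    · -- all entries ≤ pos : pos past end, both return 1
      have hend : prefLen lines lines.length ≤ pos := by
        have := hlow lines.length (by omega)
        rwa [hget _ le_rfl] at this
      rw [if_neg (by omega)]
      exact getColAuxA_high lines 0 pos (by omega)
    · -- owning line i = r - 1
      have hrb : 1 ≤ r ∧ r ≤ lines.length := by omega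
      have h1 : prefLen lines (r - 1) ≤ pos := by
        have := hlow (r - 1) (by omega)
        rwa [hget _ (by omega)] at this
      have h2 : pos < prefLen lines r := by
        have := hhigh r le_rfl (by omega)
        rwa [hget _ (by omega)] at this
      have hrr : r - 1 + 1 = r := by omega
      have h2' : pos < 0 + prefLen lines (r - 1 + 1) := by rw [hrr]; omega
      have hAi := getColAuxA_mid lines 0 pos (r - 1) (by omega) (by omega) h2'
      rw [if_pos ⟨by omega, by omega⟩, hAi]
      have hit : ((r : Int) - 1).toNat = r - 1 := by omega
      rw [hit, hget _ (by omega)]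
      omega
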